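-- pv_equiv track=rewrite | github.com/rubensgomes/java-mcp | java_mcp/java_analyzer.py | _extract_annotations
-- ===== SOURCE A (Python) =====
-- from typing import List, Dict, Optional
--
-- def _extract_annotations(lines: List[str], line_index: int) -> List[str]:
--     """Extract annotations preceding the given line."""
--     annotations = []
--     i = line_index - 1
--
--     while i >= 0:
--         line = lines[i].strip()
--         if line.startswith('@'):
--             annotations.append(line)
--             i -= 1
--         elif line == "":
--             i -= 1
--         else:
--             break
--
--     annotations.reverse()
--     return annotations
-- ===== SOURCE B (Python) =====
-- def _extract_annotations(lines, line_index):
--     """Extract annotations preceding the given line (forward scan keeping the current block)."""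
--     block = []
--     for i in range(line_index):
--         s = lines[i].strip()
--         if s.startswith('@'):
--             block.append(s)
--         elif s:
--             block = []
--     return block
-- ===== Notes on version B (the rewrite author's own statement) =====
-- stated objective: alternative
-- what changed: Replaces A's backward while-loop (collect '@' lines and blanks until a non-blank non-annotation line, then reverse) with a single forward pass over indices 0..line_index-1 that maintains the current annotation block (append on '@', keep on blank, reset on other), so no reversal is needed.
import Mathlib
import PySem

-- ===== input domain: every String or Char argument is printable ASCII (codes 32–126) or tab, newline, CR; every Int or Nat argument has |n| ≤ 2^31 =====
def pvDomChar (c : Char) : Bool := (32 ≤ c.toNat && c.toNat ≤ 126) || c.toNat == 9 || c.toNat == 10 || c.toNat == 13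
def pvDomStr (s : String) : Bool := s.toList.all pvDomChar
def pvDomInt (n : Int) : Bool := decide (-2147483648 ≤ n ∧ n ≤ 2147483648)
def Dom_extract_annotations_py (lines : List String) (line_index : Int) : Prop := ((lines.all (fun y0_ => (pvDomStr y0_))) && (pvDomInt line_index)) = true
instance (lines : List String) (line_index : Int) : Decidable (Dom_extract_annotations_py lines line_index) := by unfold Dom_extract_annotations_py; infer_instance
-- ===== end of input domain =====

-- B replaces A's backward while-loop + reverse by one forward pass keeping the current block; same cost, no reversal.

-- ===== PORT A =====
-- A's while loop, i counting down from line_index-1; fuel n means current index i = n-1.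
-- 'none' from pyGet? is Python's IndexError, excluded by Pre_.
def pvAGo (lines : List String) : Nat → List String → List String
  | 0, acc => acc
  | n+1, acc =>
    match PySem.List.pyGet? lines (n : Int) with
    | none => acc
    | some raw =>
      let line := PySem.Str.strip raw
      if PySem.Str.startswith line "@" then pvAGo lines n (acc ++ [line])
      else if line == "" then pvAGo lines n acc
      else acc

def extract_annotations_py (lines : List String) (line_index : Int) : List String :=
  let i := line_index - 1
  let annotations := if i < 0 then [] else pvAGo lines (i.toNat + 1) []
  annotations.reverse

-- ===== PORT B =====
def extract_annotations_py_alt (lines : List String) (line_index : Int) : List String :=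
  (PySem.List.pyRange 0 line_index 1).foldl
    (fun block i =>
      match PySem.List.pyGet? lines i with
      | none => block  -- IndexError in Python; excluded by Pre_
      | some raw =>
        let s := PySem.Str.strip raw
        if PySem.Str.startswith s "@" then block ++ [s]
        else if s == "" then block
        else [])
    []

-- ===== PRECONDITION & SPEC =====
-- Both A and B raise IndexError exactly when line_index exceeds len(lines); those inputs are excluded.
def Pre_extract_annotations_py (lines : List String) (line_index : Int) : Prop :=
  line_index ≤ (lines.length : Int)
instance (lines : List String) (line_index : Int) : Decidable (Pre_extract_annotations_py lines line_index) := by unfold Pre_extract_annotations_py; infer_instance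

def pvWitness_extract_annotations_py : List String × Int := (["x", "@A", "", " @B "], 4)

def Spec_extract_annotations_py (lines : List String) (line_index : Int) (out : List String) : Prop := out = extract_annotations_py_alt lines line_index
instance (lines : List String) (line_index : Int) (out : List String) : Decidable (Spec_extract_annotations_py lines line_index out) := by unfold Spec_extract_annotations_py; infer_instance

-- ===== CLAIM (what is proved, stated in full; the proofs are below) =====
def Claim_equal_extract_annotations_py : Prop := ∀ (lines : List String) (line_index : Int), Dom_extract_annotations_py lines line_index → Pre_extract_annotations_py lines line_index → Spec_extract_annotations_py lines line_index (extract_annotations_py lines line_index)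

-- ===== LEMMAS AND PROOFS =====

-- A's loop only extends its accumulator on the left recursion; factor the accumulator out.
theorem pvAGo_acc (lines : List String) (n : Nat) (acc : List String) :
    pvAGo lines n acc = acc ++ pvAGo lines n [] := by
  induction n generalizing acc with
  | zero => simp [pvAGo]
  | succ n ih =>
    simp only [pvAGo]
    cases h : PySem.List.pyGet? lines (n : Int) with
    | none => simp
    | some raw =>
      simp only
      split_ifs with h1 h2
      · rw [ih (acc ++ [PySem.Str.strip raw]), ih ([] ++ [PySem.Str.strip raw])]; simp
      · exact ih acc
      · simp

-- Main invariant: for n ≤ lines.length, the reversed backward accumulation equals B's forward fold.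
theorem pvMain (lines : List String) (n : Nat) (hn : n ≤ lines.length) :
    (pvAGo lines n []).reverse =
      (PySem.List.pyRange 0 (n : Int) 1).foldl
        (fun block i =>
          match PySem.List.pyGet? lines i with
          | none => block
          | some raw =>
            let s := PySem.Str.strip raw
            if PySem.Str.startswith s "@" then block ++ [s]
            else if s == "" then block
            else [])
        [] := by
  induction n with
  | zero => simp [pvAGo]
  | succ n ih =>
    have hn' : n ≤ lines.length := Nat.le_of_succ_le hn
    have hrange : PySem.List.pyRange 0 ((n : Int) + 1) 1
        = PySem.List.pyRange 0 (n : Int) 1 ++ [(n : Int)] :=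
      PySem.List.pyRange_one_succ_right (Int.natCast_nonneg n)
    have hget : PySem.List.pyGet? lines (n : Int) = some (lines[n]'(by omega)) := by
      simp [PySem.List.pyGet?_natCast, List.getElem?_eq_getElem (by omega : n < lines.length)]
    push_cast
    rw [hrange, List.foldl_append, ← ih hn']
    simp only [pvAGo, hget, List.foldl_cons, List.foldl_nil]
    split_ifs with h1 h2
    · rw [pvAGo_acc]; simp
    · rfl
    · simp

-- ===== VERDICT (by name: the statement is the Claim_ definition above) =====
theorem extract_annotations_py_spec : Claim_equal_extract_annotations_py := by
  intro lines line_index _ hpre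
  unfold Spec_extract_annotations_py extract_annotations_py extract_annotations_py_alt
  unfold Pre_extract_annotations_py at hpre
  by_cases hneg : line_index - 1 < 0
  · have : PySem.List.pyRange 0 line_index 1 = [] :=
      PySem.List.pyRange_one_eq_nil (by omega)
    simp [hneg, this]
  · have h1 : line_index - 1 ≥ 0 := by omega
    have hval : ((line_index - 1).toNat + 1 : Int) = line_index := by omega
    have hfuel : (line_index - 1).toNat + 1 ≤ lines.length := by omega
    have := pvMain lines ((line_index - 1).toNat + 1) hfuel
    simp only [hneg, if_false]
    rw [this]
    congr 1
    push_cast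
    rw [hval]
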